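-- pv_equiv track=rewrite | github.com/Leo-Mendoza/PegueleAlPrecio | testeo.py | lectura
-- ===== SOURCE A (Python) =====
-- def lectura(cadena):
--     contador = 0
--     lista = []
--     Char = ""
--     newChar = ""
--     nuevaLista = []
--     for i in cadena:
--         if i == "\n":
--             Char += ","
--         else:
--             Char += i
--     for i in Char:
--         if i != ",":
--             newChar += i
--         else:
--             nuevaLista.append(newChar)
--             newChar = ""
--             contador += 1
--             if contador % 3 == 0 and contador != 1:
--                 lista.append(nuevaLista)
--                 nuevaLista = []
--     return lista
-- ===== SOURCE B (Python) =====
-- def lectura(cadena):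
--     parts = cadena.replace("\n", ",").split(",")[:-1]
--     return [parts[i:i+3] for i in range(0, len(parts) - len(parts) % 3, 3)]
-- ===== Notes on version B (the rewrite author's own statement) =====
-- stated objective: idiomatic
-- what changed: Replaces the two hand-rolled character-accumulation loops with replace/split to get the comma-terminated fields and a range-stepped slice comprehension to chunk them into triples.
import Mathlib
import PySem

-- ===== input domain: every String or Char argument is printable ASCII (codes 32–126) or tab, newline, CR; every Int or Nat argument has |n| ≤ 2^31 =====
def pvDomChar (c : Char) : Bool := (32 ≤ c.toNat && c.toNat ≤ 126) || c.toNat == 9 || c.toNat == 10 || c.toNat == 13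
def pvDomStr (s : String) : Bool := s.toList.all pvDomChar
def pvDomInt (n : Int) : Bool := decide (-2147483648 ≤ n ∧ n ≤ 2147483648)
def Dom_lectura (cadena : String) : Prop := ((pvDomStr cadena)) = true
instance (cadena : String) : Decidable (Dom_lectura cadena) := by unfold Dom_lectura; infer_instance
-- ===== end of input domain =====

-- B replaces A's two hand-rolled character-accumulation loops by replace/split to get the
-- comma-terminated fields and a range-stepped slice comprehension to chunk them into triples
-- (objective: idiomatic; same return value on every input).


-- ===== PORT A =====
-- body of A's second loop; state = (contador, lista, newChar, nuevaLista)
def lecturaStep : (Int × List (List String) × List Char × List String) → Char →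
    (Int × List (List String) × List Char × List String)
  | (contador, lista, newChar, nuevaLista), i =>
    if i ≠ ',' then (contador, lista, newChar ++ [i], nuevaLista)
    else
      let nuevaLista' := nuevaLista ++ [String.ofList newChar]
      let contador' := contador + 1
      if PySem.Int.mod contador' 3 == 0 && contador' != 1 then
        (contador', lista ++ [nuevaLista'], ([] : List Char), ([] : List String))
      else
        (contador', lista, ([] : List Char), nuevaLista')

def lectura (cadena : String) : List (List String) :=
  -- first loop: Char += ("," if i == "\n" else i)
  let charAcc := cadena.toList.foldl
    (fun acc i => if i = '\n' then acc ++ [','] else acc ++ [i]) ([] : List Char)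
  -- second loop over Char
  let st := charAcc.foldl lecturaStep (0, ([] : List (List String)), ([] : List Char), ([] : List String))
  st.2.1

-- ===== PORT B =====
def lectura_alt (cadena : String) : List (List String) :=
  -- parts = cadena.replace("\n", ",").split(",")[:-1]   (str.split(",") via Chars.splitOn, fields as String)
  let parts : List String :=
    PySem.List.slice
      ((PySem.Chars.splitOn (PySem.Str.replace cadena "\n" ",").toList ",".toList).map String.ofList)
      none (some (-1))
  -- [parts[i:i+3] for i in range(0, len(parts) - len(parts) % 3, 3)]
  (PySem.List.pyRange 0 ((parts.length : Int) - PySem.Int.mod (parts.length : Int) 3) 3).map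
    (fun i => PySem.List.slice parts (some i) (some (i + 3)))

-- ===== PRECONDITION & SPEC =====
def Spec_lectura (cadena : String) (out : List (List String)) : Prop := out = lectura_alt cadena
instance (cadena : String) (out : List (List String)) : Decidable (Spec_lectura cadena out) := by unfold Spec_lectura; infer_instance

-- ===== CLAIM (what is proved, stated in full; the proofs are below) =====
def Claim_equal_lectura : Prop := ∀ (cadena : String), Dom_lectura cadena → Spec_lectura cadena (lectura cadena)

-- ===== LEMMAS AND PROOFS =====

-- the comma-terminated fields of a char list, given the partial field `cur` (A's newChar)
def pvFields (cur : List Char) : List Char → List String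
  | [] => []
  | x :: t => if x = ',' then String.ofList cur :: pvFields [] t else pvFields (cur ++ [x]) t

-- split at every comma, keeping the trailing piece (= Python split(","))
def pvSplitAll (cur : List Char) : List Char → List (List Char)
  | [] => [cur]
  | x :: t => if x = ',' then cur :: pvSplitAll [] t else pvSplitAll (cur ++ [x]) t

-- A's grouping: fill the partial group G (nuevaLista), flushing at size 3
def pvFill (G : List String) : List String → List (List String)
  | [] => []
  | f :: t => if G.length = 2 then (G ++ [f]) :: pvFill [] t else pvFill (G ++ [f]) t

-- chunks of exactly 3, remainder dropped
def pvChunk3 {α : Type} : List α → List (List α)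
  | a :: b :: c :: t => [a, b, c] :: pvChunk3 t
  | _ => []

theorem pvSplitAll_ne_nil (cur l) : pvSplitAll cur l ≠ [] := by
  induction l generalizing cur with
  | nil => simp [pvSplitAll]
  | cons x t ih => simp only [pvSplitAll]; split_ifs <;> simp [ih]

theorem pvFields_eq (cur l) :
    pvFields cur l = ((pvSplitAll cur l).dropLast).map String.ofList := by
  induction l generalizing cur with
  | nil => simp [pvFields, pvSplitAll]
  | cons x t ih =>
    simp only [pvFields, pvSplitAll]
    split_ifs with h
    · rw [List.dropLast_cons_of_ne_nil (pvSplitAll_ne_nil [] t)]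
      simp [ih]
    · exact ih _

-- ===== A side =====

theorem lectura_loop (l : List Char) (n : Nat) (lista : List (List String))
    (cur : List Char) (G : List String) (hG : G.length = n % 3) :
    (l.foldl lecturaStep ((n : Int), lista, cur, G)).2.1
      = lista ++ pvFill G (pvFields cur l) := by
  induction l generalizing n lista cur G with
  | nil => simp [pvFields, pvFill]
  | cons x t ih =>
    by_cases h : x = ','
    · subst h
      have hcast : ((n : Int) + 1) = ((n + 1 : Nat) : Int) := by push_cast; ring
      have hmod : PySem.Int.mod ((n : Int) + 1) 3 = (((n + 1) % 3 : Nat) : Int) := by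
        rw [hcast, show (3 : Int) = ((3 : Nat) : Int) by norm_num, PySem.Int.mod_natCast]
      by_cases h2 : G.length = 2
      · have hflush : (n + 1) % 3 = 0 := by omega
        have hstep : lecturaStep ((n : Int), lista, cur, G) ','
            = (((n + 1 : Nat) : Int), lista ++ [G ++ [String.ofList cur]], ([] : List Char), ([] : List String)) := by
          simp only [lecturaStep, if_neg (by simp : ¬(',' ≠ ','))]
          rw [if_pos]
          · rw [hcast]
          · simp only [hcast]
            simp
            omega
        rw [List.foldl_cons, hstep, ih (n + 1) _ _ _ (by simp [hflush])]
        simp [pvFields, pvFill, h2]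
      · have hnf : (n + 1) % 3 ≠ 0 := by omega
        have hstep : lecturaStep ((n : Int), lista, cur, G) ','
            = (((n + 1 : Nat) : Int), lista, ([] : List Char), G ++ [String.ofList cur]) := by
          simp only [lecturaStep, if_neg (by simp : ¬(',' ≠ ','))]
          rw [if_neg, hcast]
          simp only [hmod]
          simp
          omega
        rw [List.foldl_cons, hstep, ih (n + 1) _ _ _ (by simp; omega)]
        simp [pvFields, pvFill, h2]
    · have hstep : lecturaStep ((n : Int), lista, cur, G) x
          = ((n : Int), lista, cur ++ [x], G) := by
        simp [lecturaStep, h]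
      rw [List.foldl_cons, hstep, ih n _ _ _ hG]
      simp [pvFields, h]

theorem pvFill_eq_chunk3 : ∀ fs : List String, pvFill [] fs = pvChunk3 fs
  | [] => by simp [pvFill, pvChunk3]
  | [a] => by simp [pvFill, pvChunk3]
  | [a, b] => by simp [pvFill, pvChunk3]
  | a :: b :: c :: t => by simp [pvFill, pvChunk3, pvFill_eq_chunk3 t]

-- ===== B side =====

theorem replace_go_single (a b : Char) (l : List Char) (fuel : Nat) (acc : List Char)
    (h : l.length ≤ fuel) :
    PySem.Chars.replace.go [a] [b] fuel l acc
      = acc.reverse ++ l.map (fun c => if c = a then b else c) := by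
  induction l generalizing fuel acc with
  | nil => cases fuel <;> simp [PySem.Chars.replace.go]
  | cons c t ih =>
    cases fuel with
    | zero => simp at h
    | succ f =>
      simp only [PySem.Chars.replace.go]
      by_cases hc : c = a
      · rw [if_pos (by simp [hc, List.isPrefixOf])]
        rw [show List.drop [a].length (c :: t) = t from rfl]
        rw [ih f _ (by simpa using h)]
        simp [hc]
      · rw [if_neg (by simp only [List.isPrefixOf]; simp; exact fun h' => hc h'.symm)]
        rw [ih f _ (by simpa using h)]
        simp [hc]

theorem replace_single (a b : Char) (l : List Char) :
    PySem.Chars.replace l [a] [b] = l.map (fun c => if c = a then b else c) := by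
  simp only [PySem.Chars.replace]
  rw [if_neg (by simp)]
  simpa using replace_go_single a b l l.length [] le_rfl

theorem splitOn_go_comma (l : List Char) (fuel : Nat) (cur : List Char)
    (acc : List (List Char)) (h : l.length < fuel) :
    PySem.Chars.splitOn.go [','] fuel l cur acc
      = acc.reverse ++ pvSplitAll cur.reverse l := by
  induction l generalizing fuel cur acc with
  | nil =>
    cases fuel with
    | zero => simp at h
    | succ f => simp [PySem.Chars.splitOn.go, pvSplitAll]
  | cons c t ih =>
    cases fuel with
    | zero => simp at h
    | succ f =>
      simp only [PySem.Chars.splitOn.go]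
      by_cases hc : c = ','
      · rw [if_pos (by simp [hc, List.isPrefixOf])]
        rw [show List.drop [','].length (c :: t) = t from rfl]
        rw [ih f _ _ (by simpa using h)]
        simp [pvSplitAll, hc]
      · rw [if_neg (by simp only [List.isPrefixOf]; simp; exact fun h' => hc h'.symm)]
        rw [ih f _ _ (by simpa using h)]
        simp [pvSplitAll, hc]

theorem splitOn_comma (l : List Char) :
    PySem.Chars.splitOn l [','] = pvSplitAll [] l := by
  simp only [PySem.Chars.splitOn]
  simpa using splitOn_go_comma l (l.length + 1) [] [] (by omega)

theorem slice_map {α β : Type} (f : α → β) (l : List α) (a b : Option Int) :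
    PySem.List.slice (l.map f) a b = (PySem.List.slice l a b).map f := by
  cases a <;> cases b <;> simp [PySem.List.slice, List.map_take, List.map_drop]

theorem slice_neg_one {α : Type} (l : List α) (h : l ≠ []) :
    PySem.List.slice l none (some (-1)) = l.dropLast := by
  have hl : 1 ≤ l.length := by
    cases l with | nil => simp at h | cons a t => simp
  simp only [PySem.List.slice, PySem.List.clampIdx]
  rw [if_pos (by omega : (-1 : Int) < 0), if_neg (by omega)]
  rw [List.dropLast_eq_take]
  congr 1
  omega

theorem pyRange3_cons (a b : Int) (h : a < b) :
    PySem.List.pyRange a b 3 = a :: PySem.List.pyRange (a + 3) b 3 := by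
  simp only [PySem.List.pyRange, if_neg (by norm_num : ¬(3:Int) = 0)]
  rw [if_pos (by norm_num : (0:Int) < 3), if_pos (by norm_num : (0:Int) < 3), if_pos h]
  by_cases h3 : a + 3 < b
  · rw [if_pos h3]
    have hcount : ((b - a + 3 - 1) / 3).toNat = ((b - (a + 3) + 3 - 1) / 3).toNat + 1 := by
      omega
    rw [hcount, List.range_succ_eq_map]
    simp only [List.map_cons, List.map_map]
    congr 1
    · push_cast; ring
    · apply List.map_congr_left
      intro k _
      simp only [Function.comp_apply]
      push_cast
      ring
  · rw [if_neg h3]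
    have hcount : ((b - a + 3 - 1) / 3).toNat = 1 := by omega
    rw [hcount]
    simp

theorem chunk_map (t full : List String) (k : Nat) (hdrop : full.drop k = t) :
    (PySem.List.pyRange (k : Int)
        ((k : Int) + ((t.length - t.length % 3 : Nat) : Int)) 3).map
      (fun i => PySem.List.slice full (some i) (some (i + 3)))
      = pvChunk3 t := by
  induction t using pvChunk3.induct generalizing k with
  | case1 a b c t' ih =>
    have hlen : ((a :: b :: c :: t').length - (a :: b :: c :: t').length % 3 : Nat)
        = (t'.length - t'.length % 3) + 3 := by
      simp only [List.length_cons]; omega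
    rw [hlen]
    rw [pyRange3_cons _ _ (by push_cast; omega)]
    simp only [List.map_cons]
    have hhead : PySem.List.slice full (some (k : Int)) (some ((k : Int) + 3)) = [a, b, c] := by
      rw [show ((k : Int) + 3) = ((k + 3 : Nat) : Int) by push_cast; ring, PySem.List.slice_natCast]
      rw [show (k + 3 - k : Nat) = 3 by omega, hdrop]
      rfl
    rw [hhead]
    have htail : ((k : Int) + 3) = ((k + 3 : Nat) : Int) := by push_cast; ring
    rw [htail, show ((k : Int) + (((t'.length - t'.length % 3) + 3 : Nat) : Int))
        = ((k + 3 : Nat) : Int) + ((t'.length - t'.length % 3 : Nat) : Int) by push_cast; ring]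
    rw [ih (k + 3) (by rw [← List.drop_drop, hdrop]; rfl)]
    rfl
  | case2 t' hne =>
    have hlen : (t'.length - t'.length % 3 : Nat) = 0 := by
      match t', hne with
      | [], _ => rfl
      | [a], _ => rfl
      | [a, b], _ => rfl
      | a :: b :: c :: t'', hne => exact absurd rfl (by intro hc; exact (hne a b c t'' hc).elim)
    rw [hlen]
    simp only [Nat.cast_zero, add_zero]
    rw [show PySem.List.pyRange (k : Int) (k : Int) 3 = [] by simp [PySem.List.pyRange]]
    match t', hne with
    | [], _ => rfl
    | [a], _ => rfl
    | [a, b], _ => rfl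
    | a :: b :: c :: t'', hne => exact absurd rfl (by intro hc; exact (hne a b c t'' hc).elim)

-- ===== assembly =====

theorem first_loop_eq (c : List Char) :
    c.foldl (fun acc i => if i = '\n' then acc ++ [','] else acc ++ [i]) ([] : List Char)
      = c.map (fun i => if i = '\n' then ',' else i) := by
  rw [PySem.List.foldl_congr_mem c _
    (fun acc x => acc ++ [if x = '\n' then ',' else x]) _
    (by intro acc x _; by_cases hx : x = '\n' <;> simp [hx])]
  simpa using PySem.List.foldl_append_singleton_eq_map (fun i => if i = '\n' then ',' else i) c []

theorem lectura_eq (cadena : String) :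
    lectura cadena
      = pvChunk3 (((pvSplitAll [] (cadena.toList.map (fun i => if i = '\n' then ',' else i))).dropLast).map String.ofList) := by
  show (List.foldl lecturaStep (0, [], [], [])
      (cadena.toList.foldl (fun acc i => if i = '\n' then acc ++ [','] else acc ++ [i]) [])).2.1 = _
  rw [first_loop_eq]
  rw [show ((0 : Int), ([] : List (List String)), ([] : List Char), ([] : List String))
      = (((0 : Nat) : Int), ([] : List (List String)), ([] : List Char), ([] : List String)) by norm_num]
  rw [lectura_loop _ 0 [] [] [] (by simp)]
  rw [pvFields_eq, pvFill_eq_chunk3]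
  simp

theorem lectura_alt_eq (cadena : String) :
    lectura_alt cadena
      = pvChunk3 (((pvSplitAll [] (cadena.toList.map (fun i => if i = '\n' then ',' else i))).dropLast).map String.ofList) := by
  show (PySem.List.pyRange 0 _ 3).map _ = _
  have hrepl : (PySem.Str.replace cadena "\n" ",").toList
      = cadena.toList.map (fun i => if i = '\n' then ',' else i) := by
    rw [PySem.Str.toList_replace]
    exact replace_single '\n' ',' cadena.toList
  have hsplit : PySem.Chars.splitOn (PySem.Str.replace cadena "\n" ",").toList ",".toList
      = pvSplitAll [] (cadena.toList.map (fun i => if i = '\n' then ',' else i)) := by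
    rw [hrepl, show (",".toList) = [','] from rfl, splitOn_comma]
  set S := pvSplitAll [] (cadena.toList.map (fun i => if i = '\n' then ',' else i)) with hS
  have hparts : PySem.List.slice
      ((PySem.Chars.splitOn (PySem.Str.replace cadena "\n" ",").toList ",".toList).map String.ofList)
      none (some (-1)) = (S.dropLast).map String.ofList := by
    rw [hsplit, slice_map, slice_neg_one _ (pvSplitAll_ne_nil _ _), List.map_dropLast]
  rw [hparts]
  set P := (S.dropLast).map String.ofList with hP
  have hmod : PySem.Int.mod (P.length : Int) 3 = ((P.length % 3 : Nat) : Int) := by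
    rw [show ((3:Int)) = ((3 : Nat) : Int) by norm_num, PySem.Int.mod_natCast]
  rw [hmod, show ((P.length : Int) - ((P.length % 3 : Nat) : Int))
      = ((0 : Nat) : Int) + ((P.length - P.length % 3 : Nat) : Int) by omega]
  rw [show ((0 : Int)) = ((0 : Nat) : Int) by norm_num]
  exact chunk_map P P 0 (by simp)

-- ===== VERDICT (by name: the statement is the Claim_ definition above) =====
theorem lectura_spec : Claim_equal_lectura := by
  intro cadena _
  unfold Spec_lectura
  rw [lectura_eq, lectura_alt_eq]
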